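-- pv_equiv track=rewrite | github.com/M-MERALA/-Cryptography-System---Encryption-Decryption-Toolkit | chiper.py | check_invalid_input
-- ===== SOURCE A (Python) =====
-- def check_invalid_input(text, input_type):
--     if any(char.isdigit() for char in text):
--         return f"Error: {input_type} must not contain numbers."
--
--     if input_type == "Key":
--         if any(not char.isalpha() for char in text):
--             return f"Error: {input_type} must contain letters only (no symbols or spaces)."
--     else:  # Message
--         if any(not (char.isalpha() or char.isspace()) for char in text):
--             return f"Error: {input_type} must not contain symbols."
--
--     return None
-- ===== SOURCE B (Python) =====
-- def check_invalid_input(text, input_type):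
--     letters_only = input_type == "Key"
--
--     def severity(ch):
--         if ch.isdigit():
--             return 2
--         if ch.isalpha() or (not letters_only and ch.isspace()):
--             return 0
--         return 1
--
--     worst = max(map(severity, text), default=0)
--     if worst == 0:
--         return None
--     if worst == 2:
--         return f"Error: {input_type} must not contain numbers."
--     if letters_only:
--         return f"Error: {input_type} must contain letters only (no symbols or spaces)."
--     return f"Error: {input_type} must not contain symbols."
-- ===== Notes on version B (the rewrite author's own statement) =====
-- stated objective: alternative
-- what changed: Replaced A's staged any(...) scans with a max-reduction over a per-character severity ranking (digit=2, invalid=1, ok=0); the result message is dispatched from the single worst severity.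
import Mathlib
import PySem

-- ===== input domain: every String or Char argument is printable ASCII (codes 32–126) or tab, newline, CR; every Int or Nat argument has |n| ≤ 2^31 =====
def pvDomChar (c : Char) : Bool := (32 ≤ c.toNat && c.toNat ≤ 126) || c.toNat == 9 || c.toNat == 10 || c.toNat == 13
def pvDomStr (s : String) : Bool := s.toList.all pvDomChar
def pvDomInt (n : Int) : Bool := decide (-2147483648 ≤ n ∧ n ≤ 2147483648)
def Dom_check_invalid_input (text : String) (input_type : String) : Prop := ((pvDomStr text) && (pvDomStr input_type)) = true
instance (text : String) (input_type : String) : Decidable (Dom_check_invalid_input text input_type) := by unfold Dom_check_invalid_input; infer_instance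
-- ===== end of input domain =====

-- B replaces A's staged any(...) scans with a max-reduction over a per-character severity rank (digit=2, invalid=1, ok=0); same cost (alternative decomposition).

-- ===== PORT A =====
def check_invalid_input (text : String) (input_type : String) : Option String :=
  if text.toList.any (fun c => PySem.Chars.isdigit c) then
    some ("Error: " ++ input_type ++ " must not contain numbers.")
  else if input_type == "Key" then
    if text.toList.any (fun c => !PySem.Chars.isalpha c) then
      some ("Error: " ++ input_type ++ " must contain letters only (no symbols or spaces).")
    else none
  else
    if text.toList.any (fun c => !(PySem.Chars.isalpha c || PySem.Chars.isspace c)) then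
      some ("Error: " ++ input_type ++ " must not contain symbols.")
    else none

-- ===== PORT B =====
-- per-character severity rank: digit=2, invalid=1, ok=0
def pvSeverity (letters_only : Bool) (ch : Char) : Nat :=
  if PySem.Chars.isdigit ch then 2
  else if PySem.Chars.isalpha ch || (!letters_only && PySem.Chars.isspace ch) then 0
  else 1

def check_invalid_input_alt (text : String) (input_type : String) : Option String :=
  let letters_only := input_type == "Key"
  -- max(map(severity, text), default=0)
  let worst := (text.toList.map (pvSeverity letters_only)).foldl max 0
  if worst == 0 then none
  else if worst == 2 then some ("Error: " ++ input_type ++ " must not contain numbers.")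
  else if letters_only then some ("Error: " ++ input_type ++ " must contain letters only (no symbols or spaces).")
  else some ("Error: " ++ input_type ++ " must not contain symbols.")

-- ===== PRECONDITION & SPEC =====
def Spec_check_invalid_input (text : String) (input_type : String) (out : Option String) : Prop := out = check_invalid_input_alt text input_type
instance (text : String) (input_type : String) (out : Option String) : Decidable (Spec_check_invalid_input text input_type out) := by unfold Spec_check_invalid_input; infer_instance

-- ===== CLAIM (what is proved, stated in full; the proofs are below) =====
def Claim_equal_check_invalid_input : Prop := ∀ (text : String) (input_type : String), Dom_check_invalid_input text input_type → Spec_check_invalid_input text input_type (check_invalid_input text input_type)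

-- ===== LEMMAS AND PROOFS =====

theorem foldl_max_shift (l : List Nat) (a : Nat) :
    l.foldl max a = max a (l.foldl max 0) := by
  induction l generalizing a with
  | nil => simp
  | cons x t ih =>
    simp only [List.foldl_cons]
    rw [ih (max a x), ih (max 0 x)]
    omega

-- the max of the severities is 2 if some char is a digit, else 1 if some char has severity 1, else 0
theorem worst_char (b : Bool) (l : List Char) :
    (l.map (pvSeverity b)).foldl max 0 =
      if l.any (fun c => PySem.Chars.isdigit c) then 2
      else if l.any (fun c => pvSeverity b c == 1) then 1
      else 0 := by
  induction l with
  | nil => simp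
  | cons c t ih =>
    simp only [List.map_cons, List.foldl_cons, List.any_cons]
    rw [foldl_max_shift, ih]
    by_cases hd : PySem.Chars.isdigit c
    · have : pvSeverity b c = 2 := by simp [pvSeverity, hd]
      by_cases h2 : t.any (fun c => PySem.Chars.isdigit c) <;>
        by_cases h1 : t.any (fun c => pvSeverity b c == 1) <;>
        simp [hd, h2, h1, this]
    · by_cases h0 : PySem.Chars.isalpha c || (!b && PySem.Chars.isspace c)
      · have : pvSeverity b c = 0 := by simp [pvSeverity, hd, h0]
        by_cases h2 : t.any (fun c => PySem.Chars.isdigit c) <;>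
          by_cases h1 : t.any (fun c => pvSeverity b c == 1) <;>
          simp [hd, h2, h1, this]
      · have hs : pvSeverity b c = 1 := by simp [pvSeverity, hd, h0]
        by_cases h2 : t.any (fun c => PySem.Chars.isdigit c) <;>
          by_cases h1 : t.any (fun c => pvSeverity b c == 1) <;>
          simp [hd, h2, h1, hs]

-- with no digit present, 'severity = 1' coincides with the character being invalid
theorem any_sev_one (b : Bool) (l : List Char)
    (hnd : l.any (fun c => PySem.Chars.isdigit c) = false) :
    l.any (fun c => pvSeverity b c == 1) =
      l.any (fun c => !(PySem.Chars.isalpha c || (!b && PySem.Chars.isspace c))) := by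
  simp only [List.any_eq_false] at hnd
  induction l with
  | nil => rfl
  | cons c t ih =>
    have hc := hnd c (List.mem_cons_self ..)
    have ht : ∀ x ∈ t, ¬ (PySem.Chars.isdigit x = true) := fun x hx => hnd x (List.mem_cons_of_mem _ hx)
    simp only [List.any_cons, ih ht]
    simp at hc
    by_cases h0 : PySem.Chars.isalpha c || (!b && PySem.Chars.isspace c) <;>
      simp [pvSeverity, hc, h0]

-- ===== VERDICT (by name: the statement is the Claim_ definition above) =====
theorem check_invalid_input_spec : Claim_equal_check_invalid_input := by
  intro text input_type _
  unfold Spec_check_invalid_input check_invalid_input check_invalid_input_alt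
  simp only []
  rw [worst_char]
  by_cases hd : text.toList.any (fun c => PySem.Chars.isdigit c) = true
  · simp [hd]
  · have hd' : text.toList.any (fun c => PySem.Chars.isdigit c) = false := by
      simpa using hd
    rw [any_sev_one _ _ hd']
    by_cases hk : (input_type == "Key") = true <;>
      by_cases h1 : text.toList.any
          (fun c => !(PySem.Chars.isalpha c || (!(input_type == "Key") && PySem.Chars.isspace c))) = true <;>
      simp [hd', hk] <;> simp_all
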